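-- pv_equiv track=rewrite | github.com/VishwamAI/DNA-Flex | dnaflex/models/nlp_analysis.py | _find_base_runs
-- ===== SOURCE A (Python) =====
-- from typing import Dict, List, Any
-- from collections import defaultdict
--
-- def _find_base_runs(sequence: str) -> Dict[str, List[int]]:
--     """Find runs of consecutive bases."""
--     runs = defaultdict(list)
--     current_base = sequence[0]
--     current_run = 1
--
--     for base in sequence[1:]:
--         if base == current_base:
--             current_run += 1
--         else:
--             if current_run > 1:
--                 runs[current_base].append(current_run)
--             current_base = base
--             current_run = 1
--
--     if current_run > 1:
--         runs[current_base].append(current_run)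
--
--     return dict(runs)
-- ===== SOURCE B (Python) =====
-- def _find_base_runs(sequence):
--     """Find runs of consecutive bases via boundary indices: first collect the cut
--     positions where the character changes, then measure runs as differences of
--     adjacent boundaries."""
--     n = len(sequence)
--     bounds = [0] + [i for i in range(1, n) if sequence[i] != sequence[i - 1]] + [n]
--     runs = {}
--     for start, end in zip(bounds, bounds[1:]):
--         length = end - start
--         if length > 1:
--             runs.setdefault(sequence[start], []).append(length)
--     return runs
-- ===== Notes on version B (the rewrite author's own statement) =====
-- stated objective: alternative
-- what changed: Replaced A's streaming current_base/current_run compare-and-flush state machine with a staged index-based algorithm: first build the list of boundary (cut) positions where the character changes, then read each run length off as the difference of adjacent boundaries.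
-- crash fix: On the empty string A raises IndexError (it reads sequence[0] unconditionally) while B returns {}. — e.g. on _find_base_runs(""): A raises IndexError, B returns []
import Mathlib
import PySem

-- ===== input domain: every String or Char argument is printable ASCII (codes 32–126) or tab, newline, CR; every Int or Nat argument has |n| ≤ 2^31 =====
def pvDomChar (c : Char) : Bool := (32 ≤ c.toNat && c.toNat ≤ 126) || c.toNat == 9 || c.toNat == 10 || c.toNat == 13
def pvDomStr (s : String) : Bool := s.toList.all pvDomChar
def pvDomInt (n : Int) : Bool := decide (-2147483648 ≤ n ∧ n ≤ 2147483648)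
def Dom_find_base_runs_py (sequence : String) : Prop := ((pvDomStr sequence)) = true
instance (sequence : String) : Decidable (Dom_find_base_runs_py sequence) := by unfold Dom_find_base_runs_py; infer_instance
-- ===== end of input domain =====

-- B replaces A's streaming compare-and-flush state machine with a staged boundary-index
-- algorithm: collect the cut positions, then read run lengths off adjacent differences
-- (alternative decomposition; same cost).


-- ===== PORT A =====
-- `if current_run > 1: runs[current_base].append(current_run)` on a defaultdict(list)
def pvFlush (runs : PySem.Dict Char (List Int)) (cb : Char) (cr : Int) :
    PySem.Dict Char (List Int) :=
  if cr > 1 then runs.modify cb [] (· ++ [cr]) else runs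

-- the body of A's for-loop over sequence[1:]
def pvStepA (st : PySem.Dict Char (List Int) × Char × Int) (base : Char) :
    PySem.Dict Char (List Int) × Char × Int :=
  if base == st.2.1 then (st.1, st.2.1, st.2.2 + 1)
  else (pvFlush st.1 st.2.1 st.2.2, base, 1)

-- Python's 1-char strings iterated from `sequence` are modelled as Char; the returned
-- dict's 1-char-string keys are rebuilt with String.singleton at the end.
def find_base_runs_py (sequence : String) : List (String × List Int) :=
  match sequence.toList with
  | [] => []   -- Python raises IndexError at sequence[0]; excluded by Pre_
  | c :: rest =>
    let st := rest.foldl pvStepA (PySem.Dict.empty, c, 1)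
    (pvFlush st.1 st.2.1 st.2.2).items.map (fun p => (String.singleton p.1, p.2))

-- ===== PORT B =====
-- `[i for i in range(1, n) if sequence[i] != sequence[i - 1]]`
-- (indices drawn from range(1, n) are always in range, so pyGetD's default is never used)
def pvCuts (l : List Char) : List Int :=
  (PySem.List.pyRange 1 (l.length : Int) 1).filter
    (fun i => !(PySem.List.pyGetD l i ' ' == PySem.List.pyGetD l (i - 1) ' '))

def find_base_runs_py_alt (sequence : String) : List (String × List Int) :=
  let l := sequence.toList
  let bounds : List Int := 0 :: pvCuts l ++ [(l.length : Int)]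
  let runs := (bounds.zip bounds.tail).foldl
    (fun runs p =>
      if p.2 - p.1 > 1 then
        runs.modify (PySem.List.pyGetD l p.1 ' ') [] (· ++ [p.2 - p.1])
      else runs)
    PySem.Dict.empty
  runs.items.map (fun p => (String.singleton p.1, p.2))

-- ===== PRECONDITION & SPEC =====
-- Pre_ excludes only the empty string, where A raises IndexError (sequence[0]).
def Pre_find_base_runs_py (sequence : String) : Prop := sequence.toList ≠ []
instance (sequence : String) : Decidable (Pre_find_base_runs_py sequence) := by
  unfold Pre_find_base_runs_py; infer_instance
def pvWitness_find_base_runs_py : String := "AATCC"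

-- On the empty string A raises IndexError (it reads sequence[0] unconditionally) while B returns {}.
def Raises_find_base_runs_py (sequence : String) : Prop := sequence.toList = []
instance (sequence : String) : Decidable (Raises_find_base_runs_py sequence) := by
  unfold Raises_find_base_runs_py; infer_instance
def pvRaiseWitness_find_base_runs_py : String := ""
def pvRaiseWitnessOut_find_base_runs_py : List (String × List Int) := []

def Spec_find_base_runs_py (sequence : String) (out : List (String × List Int)) : Prop :=
  out = find_base_runs_py_alt sequence
instance (sequence : String) (out : List (String × List Int)) :
    Decidable (Spec_find_base_runs_py sequence out) := by
  unfold Spec_find_base_runs_py; infer_instance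

-- ===== CLAIM (what is proved, stated in full; the proofs are below) =====
def Claim_equal_find_base_runs_py : Prop := ∀ (sequence : String),
  Dom_find_base_runs_py sequence → Pre_find_base_runs_py sequence →
    Spec_find_base_runs_py sequence (find_base_runs_py sequence)

def Claim_raises_find_base_runs_py : Prop :=
  (∀ (sequence : String), Dom_find_base_runs_py sequence →
      Raises_find_base_runs_py sequence → ¬ Pre_find_base_runs_py sequence) ∧
  (Dom_find_base_runs_py (pvRaiseWitness_find_base_runs_py) ∧
    Raises_find_base_runs_py (pvRaiseWitness_find_base_runs_py) ∧
    find_base_runs_py_alt (pvRaiseWitness_find_base_runs_py) =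
      pvRaiseWitnessOut_find_base_runs_py)

-- ===== LEMMAS AND PROOFS =====

-- proof-side: the (base, run length) group list of a string, first run peeled
def pvGroups : List Char → List (Char × Int)
  | [] => []
  | c :: rest =>
    (c, (1 : Int) + (rest.takeWhile (· == c)).length) ::
      pvGroups (rest.dropWhile (· == c))
termination_by l => l.length
decreasing_by
  exact Nat.lt_succ_of_le (List.length_dropWhile_le _ _)

lemma pvGroups_nil : pvGroups [] = [] := by rw [pvGroups.eq_def]
lemma pvGroups_cons (c : Char) (rest : List Char) :
    pvGroups (c :: rest) =
      (c, (1 : Int) + (rest.takeWhile (· == c)).length) ::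
        pvGroups (rest.dropWhile (· == c)) := by rw [pvGroups.eq_def]

-- the shared fold step: record a run length when it exceeds 1
def pvStepB (runs : PySem.Dict Char (List Int)) (p : Char × Int) :
    PySem.Dict Char (List Int) :=
  if p.2 > 1 then runs.modify p.1 [] (· ++ [p.2]) else runs

-- proof-side view of A's loop: the group list it will still flush, given pending (cb, cr)
def pvConsume (cb : Char) (cr : Int) : List Char → List (Char × Int)
  | [] => [(cb, cr)]
  | b :: bs => if b == cb then pvConsume cb (cr + 1) bs else (cb, cr) :: pvConsume b 1 bs

lemma loopA_eq (l : List Char) : ∀ (runs : PySem.Dict Char (List Int)) (cb : Char) (cr : Int),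
    (let st := l.foldl pvStepA (runs, cb, cr); pvFlush st.1 st.2.1 st.2.2) =
      (pvConsume cb cr l).foldl pvStepB runs := by
  induction l with
  | nil => intro runs cb cr; simp [pvConsume, pvFlush, pvStepB]
  | cons b bs ih =>
    intro runs cb cr
    simp only [List.foldl_cons, pvStepA, pvConsume]
    by_cases h : b == cb
    · simp only [h, if_pos]
      exact ih runs cb (cr + 1)
    · simp only [h, if_neg, Bool.false_eq_true, not_false_iff, List.foldl_cons]
      have : pvStepB runs (cb, cr) = pvFlush runs cb cr := rfl
      rw [← this]
      exact ih (pvStepB runs (cb, cr)) b 1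

lemma consume_eq (l : List Char) : ∀ (c : Char) (k : Int),
    pvConsume c k l =
      (c, k + ((l.takeWhile (· == c)).length : Int)) :: pvGroups (l.dropWhile (· == c)) := by
  induction l with
  | nil => intro c k; simp [pvConsume, pvGroups_nil]
  | cons b bs ih =>
    intro c k
    by_cases h : b == c
    · rw [show pvConsume c k (b :: bs) = pvConsume c (k + 1) bs from by
        simp [pvConsume, h]]
      rw [ih c (k + 1)]
      simp only [List.takeWhile_cons, List.dropWhile_cons, h, if_true]
      congr 2
      simp only [List.length_cons]
      push_cast
      ring
    · rw [show pvConsume c k (b :: bs) = (c, k) :: pvConsume b 1 bs from by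
        simp [pvConsume, h]]
      rw [ih b 1]
      simp [h, pvGroups_cons]

-- proof-side view of B: the (base, length) pairs read off adjacent boundaries
def pvPairs (l : List Char) : List (Char × Int) :=
  (((0 : Int) :: pvCuts l ++ [(l.length : Int)]).zip
    ((0 : Int) :: pvCuts l ++ [(l.length : Int)]).tail).map
    (fun p => (PySem.List.pyGetD l p.1 ' ', p.2 - p.1))

lemma pyGetD_nonneg (xs : List Char) (i : Int) (d : Char) (h : 0 ≤ i) :
    PySem.List.pyGetD xs i d = xs.getD i.toNat d := by
  unfold PySem.List.pyGetD PySem.List.pyGet? PySem.List.pyIdx?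
  rw [if_pos h]
  by_cases hlt : i < (xs.length : Int)
  · simp [hlt, List.getD]
  · rw [if_neg hlt]
    have : xs.length ≤ i.toNat := by omega
    simp [List.getD, List.getElem?_eq_none this]

lemma pyGetD_cons_shift (a : Char) (l : List Char) (i : Int) (h : 0 ≤ i) (d : Char) :
    PySem.List.pyGetD (a :: l) (i + 1) d = PySem.List.pyGetD l i d := by
  rw [pyGetD_nonneg _ _ _ (by omega), pyGetD_nonneg _ _ _ h]
  have h1 : (i + 1).toNat = i.toNat + 1 := by omega
  simp [h1, List.getD]

-- element-level recurrence of the cut list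
lemma pvCuts_cons₂ (a b : Char) (t : List Char) :
    pvCuts (a :: b :: t) =
      (if b == a then [] else [1]) ++ (pvCuts (b :: t)).map (· + 1) := by
  unfold pvCuts
  rw [show (((a :: b :: t).length : Int)) = (t.length : Int) + 2 from by
    push_cast [List.length_cons]; ring]
  rw [show (((b :: t).length : Int)) = (t.length : Int) + 1 from by
    push_cast [List.length_cons]; ring]
  rw [PySem.List.pyRange_one_cons (by omega)]
  rw [List.filter_cons]
  have hp1 : (!(PySem.List.pyGetD (a :: b :: t) 1 ' ' ==
      PySem.List.pyGetD (a :: b :: t) (1 - 1) ' ')) = !(b == a) := by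
    norm_num [pyGetD_nonneg, List.getD]
  rw [hp1]
  rw [show (1 : Int) + 1 = 2 from rfl]
  have hshift : PySem.List.pyRange 2 ((t.length : Int) + 2) 1 =
      (PySem.List.pyRange 1 ((t.length : Int) + 1) 1).map (· + 1) := by
    rw [PySem.List.pyRange_one, PySem.List.pyRange_one, List.map_map]
    rw [show ((t.length : Int) + 2 - 2).toNat = t.length from by omega]
    rw [show ((t.length : Int) + 1 - 1).toNat = t.length from by omega]
    exact List.map_congr_left (fun k _ => by simp; ring)
  rw [hshift, List.filter_map]
  have hcong : ∀ i ∈ PySem.List.pyRange 1 ((t.length : Int) + 1) 1,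
      ((fun i => !(PySem.List.pyGetD (a :: b :: t) i ' ' ==
          PySem.List.pyGetD (a :: b :: t) (i - 1) ' ')) ∘ (· + 1)) i =
        (fun i => !(PySem.List.pyGetD (b :: t) i ' ' ==
          PySem.List.pyGetD (b :: t) (i - 1) ' ')) i := by
    intro i hi
    have hmem := (PySem.List.mem_pyRange_one).mp hi
    simp only [Function.comp_apply]
    rw [pyGetD_cons_shift _ _ _ (by omega)]
    rw [show i + 1 - 1 = (i - 1) + 1 from by ring]
    rw [pyGetD_cons_shift _ _ _ (by omega)]
  rw [List.filter_congr hcong]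
  by_cases h : b == a <;> simp [h]

-- run-level recurrence of the cut list
lemma pvCuts_run (rest : List Char) : ∀ (c : Char),
    pvCuts (c :: rest) =
      if rest.dropWhile (· == c) = [] then []
      else ((1 : Int) + (rest.takeWhile (· == c)).length) ::
        (pvCuts (rest.dropWhile (· == c))).map
          (· + ((1 : Int) + (rest.takeWhile (· == c)).length)) := by
  induction rest with
  | nil =>
    intro c
    unfold pvCuts
    simp [PySem.List.pyRange_one_eq_nil]
  | cons b bs ih =>
    intro c
    rw [pvCuts_cons₂]
    by_cases hb : b == c
    · have hbc : b = c := eq_of_beq hb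
      subst hbc
      simp only [beq_self_eq_true, if_true, List.nil_append,
        List.dropWhile_cons, List.takeWhile_cons]
      rw [ih b]
      by_cases hd : bs.dropWhile (· == b) = []
      · simp [hd]
      · simp only [hd, if_false, List.map_cons, List.map_map]
        refine congrArg₂ (· :: ·) ?_ (List.map_congr_left fun x _ => ?_)
        · simp [List.length_cons]; ring
        · simp [List.length_cons]; ring
    · have hb' : ¬ b = c := fun h => hb (by simp [h])
      simp only [List.dropWhile_cons, List.takeWhile_cons, hb, Bool.false_eq_true,
        if_false, List.cons_ne_nil, List.length_nil]
      simp

lemma pyGetD_append_shift (pre xs : List Char) (i : Int) (d : Char) (h : 0 ≤ i) :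
    PySem.List.pyGetD (pre ++ xs) (i + (pre.length : Int)) d =
      PySem.List.pyGetD xs i d := by
  rw [pyGetD_nonneg _ _ _ (by omega), pyGetD_nonneg _ _ _ h]
  have h1 : (i + (pre.length : Int)).toNat = pre.length + i.toNat := by omega
  simp only [List.getD, h1]
  rw [show pre.length + i.toNat = i.toNat + pre.length from by omega,
    List.getElem?_append_right (by omega)]
  simp

lemma bounds_nonneg (l : List Char) (x : Int)
    (hx : x ∈ ((0 : Int) :: pvCuts l ++ [(l.length : Int)])) : 0 ≤ x := by
  rcases List.mem_cons.mp hx with h | h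
  · omega
  rcases List.mem_append.mp h with h | h
  · unfold pvCuts at h
    have h1 := (List.mem_filter.mp h).1
    have h2 := (PySem.List.mem_pyRange_one).mp h1
    omega
  · have h1 := List.mem_singleton.mp h
    subst h1
    exact Int.natCast_nonneg _

lemma pairs_eq_groups_aux : ∀ (n : Nat) (c : Char) (rest : List Char), rest.length ≤ n →
    pvPairs (c :: rest) = pvGroups (c :: rest) := by
  intro n
  induction n with
  | zero =>
    intro c rest hle
    have h0 : rest = [] := List.eq_nil_of_length_eq_zero (Nat.le_zero.mp hle)
    subst h0
    unfold pvPairs pvCuts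
    simp [PySem.List.pyRange_one_eq_nil, pvGroups_cons, pvGroups_nil]
  | succ n ih =>
    intro c rest hle
    by_cases hd : rest.dropWhile (· == c) = []
    · have htw : rest.takeWhile (· == c) = rest := by
        conv_rhs => rw [← List.takeWhile_append_dropWhile (p := (· == c)) (l := rest)]
        rw [hd, List.append_nil]
      unfold pvPairs
      rw [pvCuts_run, if_pos hd]
      rw [pvGroups_cons, hd, pvGroups_nil, htw]
      simp
      omega
    · have hsplit : c :: rest = (c :: rest.takeWhile (· == c)) ++ rest.dropWhile (· == c) := by
        simp [List.takeWhile_append_dropWhile]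
      set tw := rest.takeWhile (· == c) with htw
      set L' := rest.dropWhile (· == c) with hL'
      set K : Int := 1 + (tw.length : Int) with hK
      have hlen : ((c :: rest).length : Int) = K + (L'.length : Int) := by
        have h1 := congrArg List.length hsplit
        simp only [List.length_cons, List.length_append] at h1
        rw [hK]
        simp only [List.length_cons]
        push_cast
        omega
      obtain ⟨c', rest', hLc⟩ : ∃ c' rest', L' = c' :: rest' := by
        cases hL0 : L' with
        | nil => exact absurd hL0 hd
        | cons a b => exact ⟨a, b, rfl⟩
      have hlen' : rest'.length ≤ n := by
        have h1 : L'.length ≤ rest.length := List.length_dropWhile_le _ _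
        rw [hLc] at h1
        simp only [List.length_cons] at h1
        omega
      have ihL : pvPairs L' = pvGroups L' := by rw [hLc]; exact ih c' rest' hlen'
      unfold pvPairs
      rw [pvCuts_run, if_neg hd]
      rw [← htw, ← hL', ← hK]
      have hB : (K :: (pvCuts L').map (· + K)) ++ [((c :: rest).length : Int)] =
          ((0 : Int) :: pvCuts L' ++ [(L'.length : Int)]).map (· + K) := by
        rw [hlen]
        simp only [List.map_cons, List.map_append, List.map_cons, List.map_nil]
        rw [show (0 : Int) + K = K from by ring,
          show (L'.length : Int) + K = K + (L'.length : Int) from by ring]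
      rw [List.cons_append, hB]
      rw [show ((0 : Int) :: pvCuts L' ++ [(L'.length : Int)]).map (· + K) =
            ((0 : Int) + K) :: (pvCuts L' ++ [(L'.length : Int)]).map (· + K) from by
        simp]
      rw [List.tail_cons, List.zip_cons_cons, List.map_cons]
      rw [show ((0 : Int) + K) :: (pvCuts L' ++ [(L'.length : Int)]).map (· + K) =
            ((0 : Int) :: (pvCuts L' ++ [(L'.length : Int)])).map (· + K) from rfl]
      rw [List.zip_map, List.map_map]
      have hKlen : K = (((c :: tw).length : Int)) := by
        rw [hK]; push_cast [List.length_cons]; ring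
      have hmap : ∀ p ∈ (((0 : Int) :: (pvCuts L' ++ [(L'.length : Int)])).zip
            (pvCuts L' ++ [(L'.length : Int)])),
          ((fun p => (PySem.List.pyGetD (c :: rest) p.1 ' ', p.2 - p.1)) ∘
            Prod.map (· + K) (· + K)) p =
            (fun p => (PySem.List.pyGetD L' p.1 ' ', p.2 - p.1)) p := by
        intro p hp
        obtain ⟨x, y⟩ := p
        have hp1 : 0 ≤ x :=
          bounds_nonneg L' x (by simpa using (List.of_mem_zip hp).1)
        simp only [Function.comp_apply, Prod.map]
        refine Prod.ext ?_ (by dsimp only; ring)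
        dsimp only
        rw [hsplit, hKlen, pyGetD_append_shift _ _ _ _ hp1]
      rw [List.map_congr_left hmap]
      rw [show (((0 : Int) :: (pvCuts L' ++ [(L'.length : Int)])).zip
            (pvCuts L' ++ [(L'.length : Int)])).map
            (fun p => (PySem.List.pyGetD L' p.1 ' ', p.2 - p.1)) = pvPairs L' from rfl]
      rw [ihL, pvGroups_cons, ← htw, ← hL']
      refine congrArg₂ (· :: ·) ?_ rfl
      refine Prod.ext ?_ (by rw [hK]; push_cast; ring)
      simp

lemma alt_eq (s : String) :
    find_base_runs_py_alt s =
      ((pvPairs s.toList).foldl pvStepB PySem.Dict.empty).items.map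
        (fun p => (String.singleton p.1, p.2)) := by
  unfold find_base_runs_py_alt pvPairs
  rw [List.foldl_map]
  rfl

theorem find_base_runs_py_spec : Claim_equal_find_base_runs_py := by
  intro s _ hpre
  unfold Spec_find_base_runs_py
  rw [alt_eq]
  unfold find_base_runs_py
  cases hl : s.toList with
  | nil => exact absurd hl hpre
  | cons c rest =>
    rw [pairs_eq_groups_aux rest.length c rest le_rfl]
    have h1 := loopA_eq rest PySem.Dict.empty c 1
    simp only at h1
    dsimp only
    rw [h1, consume_eq, pvGroups_cons]

@[simp]
theorem find_base_runs_py_raises : Claim_raises_find_base_runs_py := by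
  unfold Claim_raises_find_base_runs_py
  constructor
  · intro s _ hr
    unfold Pre_find_base_runs_py
    exact fun hp => hp hr
  · refine ⟨by decide, by decide, ?_⟩
    simp [find_base_runs_py_alt, pvRaiseWitness_find_base_runs_py,
      pvRaiseWitnessOut_find_base_runs_py, pvCuts]
    rfl
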